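-- pv_equiv track=rewrite | github.com/VUTP-University/Algorithms-Data-Structures-MiniProjects | miniproject-2-protocol-QV-7-team-sigma/protocol_qv7.py | stabilize_registry
-- ===== SOURCE A (Python) =====
-- def stabilize_registry(pairs: list) -> list:
--     """
--     Removes duplicate shard entries using a set and returns a list of
--     unique shard tuples.
--
--     Arguments:
--         pairs (list): List of (shard, code) tuples that may include duplicates.
--
--     Returns:
--         list: A list of unique shard tuples.
--
--     Example Input:
--         [('alpha', 7), ('beta', 12), ('gamma', 18), ('alpha', 22)]
--     Example Output:
--         [('alpha', 7), ('beta', 12), ('gamma', 18)]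
--     """
--     # TODO: Convert to set then back to list
--     seen = set()
--     unique_pairs = []
--
--     for shard, code in pairs:
--         if shard not in seen:
--             seen.add(shard)
--             unique_pairs.append((shard, code))
--
--     return unique_pairs
-- ===== SOURCE B (Python) =====
-- def stabilize_registry(pairs: list) -> list:
--     """Repeatedly take the head pair and filter its shard out of the remainder."""
--     out = []
--     rest = pairs
--     while rest:
--         shard, code = rest[0]
--         out.append((shard, code))
--         rest = [p for p in rest[1:] if p[0] != shard]
--     return out
-- ===== Notes on version B (the rewrite author's own statement) =====
-- stated objective: alternative
-- what changed: Replaces the single-pass seen-set accumulator with head-and-filter deduplication: repeatedly emit the first remaining pair and filter every later pair with the same shard out of the remainder, so no seen structure exists at all.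
import Mathlib
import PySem

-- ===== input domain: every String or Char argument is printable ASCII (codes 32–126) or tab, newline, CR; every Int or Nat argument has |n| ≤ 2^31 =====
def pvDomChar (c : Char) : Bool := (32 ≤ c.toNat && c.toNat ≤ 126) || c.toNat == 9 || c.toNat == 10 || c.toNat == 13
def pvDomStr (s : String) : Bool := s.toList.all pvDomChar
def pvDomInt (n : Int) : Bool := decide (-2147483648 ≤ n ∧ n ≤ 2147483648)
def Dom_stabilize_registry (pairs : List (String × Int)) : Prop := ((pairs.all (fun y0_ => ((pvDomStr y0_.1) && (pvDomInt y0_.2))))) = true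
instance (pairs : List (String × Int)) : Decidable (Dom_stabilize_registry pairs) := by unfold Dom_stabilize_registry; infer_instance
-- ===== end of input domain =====

-- B deduplicates by head-and-filter (emit first remaining pair, filter its shard out of the rest) instead of A's seen-set single pass; alternative algorithm, same result.


-- ===== PORT A =====
def stabilize_registry (pairs : List (String × Int)) : List (String × Int) :=
  (pairs.foldl
    (fun (st : PySem.Set String × List (String × Int)) p =>
      if PySem.Set.contains st.1 p.1 then st
      else (PySem.Set.add st.1 p.1, st.2 ++ [(p.1, p.2)]))
    (PySem.Set.empty, [])).2

-- ===== PORT B =====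
-- the while loop of Source B: emit head, filter its shard from the tail
def stabLoop (out : List (String × Int)) (rest : List (String × Int)) : List (String × Int) :=
  match rest with
  | [] => out
  | (shard, code) :: tl =>
      stabLoop (out ++ [(shard, code)]) (tl.filter (fun p => p.1 != shard))
termination_by rest.length
decreasing_by
  simp only [List.length_cons, List.length_unattach]
  exact Nat.lt_succ_of_le (le_trans (List.length_filter_le _ _) (by simp))

def stabilize_registry_alt (pairs : List (String × Int)) : List (String × Int) :=
  stabLoop [] pairs

-- ===== PRECONDITION & SPEC =====
def Spec_stabilize_registry (pairs : List (String × Int)) (out : List (String × Int)) : Prop := out = stabilize_registry_alt pairs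
instance (pairs : List (String × Int)) (out : List (String × Int)) : Decidable (Spec_stabilize_registry pairs out) := by unfold Spec_stabilize_registry; infer_instance

-- ===== CLAIM =====
def Claim_equal_stabilize_registry : Prop := ∀ (pairs : List (String × Int)), Dom_stabilize_registry pairs → Spec_stabilize_registry pairs (stabilize_registry pairs)

-- ===== LEMMAS AND PROOFS =====

lemma stabLoop_cons (out : List (String × Int)) (shard : String) (code : Int)
    (tl : List (String × Int)) :
    stabLoop out ((shard, code) :: tl)
      = stabLoop (out ++ [(shard, code)]) (tl.filter (fun p => p.1 != shard)) := by
  rw [stabLoop]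

-- A's fold starting from seen-set S and accumulator acc equals B's head-and-filter
-- loop on the pairs whose shards are not yet in S.
lemma stab_inv (pairs : List (String × Int)) (S : PySem.Set String)
    (acc : List (String × Int)) :
    (pairs.foldl
      (fun (st : PySem.Set String × List (String × Int)) p =>
        if PySem.Set.contains st.1 p.1 then st
        else (PySem.Set.add st.1 p.1, st.2 ++ [(p.1, p.2)]))
      (S, acc)).2
    = stabLoop acc (pairs.filter (fun p => !(PySem.Set.contains S p.1))) := by
  induction pairs generalizing S acc with
  | nil => simp [stabLoop]
  | cons p tl ih =>
    obtain ⟨s, c⟩ := p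
    simp only [List.foldl_cons, List.filter_cons]
    by_cases hc : PySem.Set.contains S s = true
    · rw [if_pos hc]
      simp only [hc, Bool.not_true, Bool.false_eq_true, if_neg (fun h => h)]
      exact ih S acc
    · have hc' : PySem.Set.contains S s = false := by
        cases h : PySem.Set.contains S s
        · rfl
        · exact absurd h hc
      rw [if_neg hc]
      simp only [hc', Bool.not_false, if_true]
      rw [stabLoop_cons]
      rw [ih (PySem.Set.add S s) (acc ++ [(s, c)])]
      congr 1
      rw [List.filter_filter]
      have hadd : PySem.Set.add S s = S ++ [s] := by
        simp only [PySem.Set.add, PySem.Set.contains] at *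
        rw [if_neg hc]
      apply List.filter_congr
      intro q _
      rw [hadd]
      by_cases hq : q.1 = s
      · simp [hq, PySem.Set.contains]
      · simp [PySem.Set.contains, hq]

-- ===== VERDICT =====
theorem stabilize_registry_spec : Claim_equal_stabilize_registry := by
  intro pairs _
  unfold Spec_stabilize_registry stabilize_registry stabilize_registry_alt
  have h := stab_inv pairs PySem.Set.empty []
  rw [h]
  congr 1
  apply (List.filter_eq_self).mpr
  intro q _
  simp [PySem.Set.contains, PySem.Set.empty]
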